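-- pv_equiv track=rewrite | github.com/AudranBert/AideDecision | vote.py | strongest_path_strengths
-- ===== SOURCE A (Python) =====
-- def strongest_path_strengths(d, c):
--     p = [[0 for i in range(c)] for j in range(c)]
--     for i in range(c):
--         for j in range(c):
--             if i != j :
--                 if d[i][j] > d[j][i]:
--                     p[i][j] = d[i][j]
--                 else:
--                     p[i][j] = 0
--     for i in range(c):
--         for j in range(c):
--             if i != j :
--                 for k in range(c):
--                     if i != k and j != k:
--                         p[j][k] = max (p[j][k], min (p[j][i], p[i][k]))
--     return p
-- ===== SOURCE B (Python) =====
-- def strongest_path_strengths(d, c):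
--     # widest-path closure by path doubling: repeated max-min matrix squaring.
--     # After a squaring round the matrix covers all walks with up to 2*t+1
--     # intermediate vertices; t >= c suffices, since simple paths are optimal.
--     idx = range(c)
--     m = [[d[j][k] if j != k and d[j][k] > d[k][j] else 0 for k in idx]
--          for j in idx]
--     t = 0
--     while t < c:
--         m = [[m[j][k] if j == k else
--               max([m[j][k]] + [min(m[j][i], m[i][k])
--                                for i in idx if i != j and i != k])
--               for k in idx] for j in idx]
--         t = 2 * t + 1
--     return m
-- ===== Notes on version B (the rewrite author's own statement) =====
-- stated objective: alternative
-- what changed: Phase 2 no longer runs the Floyd-Warshall pivot triple loop: B computes the widest-path closure by path doubling, repeatedly squaring the defeat matrix in the max-min semiring (each round covers walks with up to 2t+1 intermediates) until the covered walk length reaches c.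
import Mathlib
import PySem

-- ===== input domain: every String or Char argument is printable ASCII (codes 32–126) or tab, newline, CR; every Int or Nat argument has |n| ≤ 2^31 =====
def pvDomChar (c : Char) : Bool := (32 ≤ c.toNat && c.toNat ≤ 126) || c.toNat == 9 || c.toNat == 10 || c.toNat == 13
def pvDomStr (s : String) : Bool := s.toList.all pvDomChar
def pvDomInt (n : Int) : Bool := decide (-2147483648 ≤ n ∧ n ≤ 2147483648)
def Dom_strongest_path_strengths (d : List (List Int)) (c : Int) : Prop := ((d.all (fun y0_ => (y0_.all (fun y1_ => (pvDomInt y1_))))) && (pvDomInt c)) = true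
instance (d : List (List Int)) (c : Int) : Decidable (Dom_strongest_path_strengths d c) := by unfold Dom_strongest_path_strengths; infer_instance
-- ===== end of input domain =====

-- B replaces A's Floyd–Warshall pivot triple loop by widest-path path doubling:
-- repeated max–min matrix squaring until the covered walk length reaches c
-- (objective: alternative; not faster).

-- ===== PORT A =====
-- d[i][j] (indices always 0 ≤ i,j < c here; out-of-range d reads are excluded by Pre_)
def pvGet2 (m : List (List Int)) (i j : Int) : Int :=
  PySem.List.pyGetD (PySem.List.pyGetD m i []) j 0
-- p[i][j] = v
def pvSet2 (m : List (List Int)) (i j : Int) (v : Int) : List (List Int) :=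
  PySem.List.pySetD m i (PySem.List.pySetD (PySem.List.pyGetD m i []) j v)
-- body of phase 1's inner j-loop
def pvA1body (d : List (List Int)) (i : Int) (p : List (List Int)) (j : Int) : List (List Int) :=
  if i ≠ j then
    (if pvGet2 d i j > pvGet2 d j i then pvSet2 p i j (pvGet2 d i j) else pvSet2 p i j 0)
  else p
-- body of phase 2's innermost k-loop
def pvA2k (i j : Int) (p : List (List Int)) (k : Int) : List (List Int) :=
  if i ≠ k ∧ j ≠ k then
    pvSet2 p j k (max (pvGet2 p j k) (min (pvGet2 p j i) (pvGet2 p i k)))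
  else p
-- body of phase 2's j-loop
def pvA2j (idx : List Int) (i : Int) (p : List (List Int)) (j : Int) : List (List Int) :=
  if i ≠ j then idx.foldl (pvA2k i j) p else p

def strongest_path_strengths (d : List (List Int)) (c : Int) : List (List Int) :=
  let idx := PySem.List.pyRange 0 c 1
  let p0 := idx.map (fun _ => idx.map (fun _ => (0 : Int)))
  let p1 := idx.foldl (fun p i => idx.foldl (pvA1body d i) p) p0
  idx.foldl (fun p i => idx.foldl (pvA2j idx i) p) p1

-- ===== PORT B =====
-- initial defeat-matrix entry
def pvE (d : List (List Int)) (j k : Int) : Int :=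
  if j ≠ k ∧ pvGet2 d j k > pvGet2 d k j then pvGet2 d j k else 0
-- one max–min squaring round
def pvSq (idx : List Int) (m : List (List Int)) : List (List Int) :=
  idx.map (fun j => idx.map (fun k =>
    if j = k then pvGet2 m j k
    else ((idx.filter (fun i => i ≠ j ∧ i ≠ k)).map
            (fun i => min (pvGet2 m j i) (pvGet2 m i k))).foldl max (pvGet2 m j k)))
-- while t < c: m := square m; t := 2*t+1
def pvLoop (idx : List Int) (c : Int) (t : Nat) (m : List (List Int)) : List (List Int) :=
  if h : (t : Int) < c then pvLoop idx c (2 * t + 1) (pvSq idx m) else m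
termination_by c.toNat - t
decreasing_by omega

def strongest_path_strengths_alt (d : List (List Int)) (c : Int) : List (List Int) :=
  let idx := PySem.List.pyRange 0 c 1
  let m0 := idx.map (fun j => idx.map (fun k => pvE d j k))
  pvLoop idx c 0 m0

-- ===== PRECONDITION & SPEC =====
-- Pre_ excludes exactly the inputs where Python A raises IndexError: some off-diagonal
-- d[i][j] with i,j < c does not exist.
def Pre_strongest_path_strengths (d : List (List Int)) (c : Int) : Prop :=
  c.toNat ≤ 1 ∨
    (c.toNat ≤ d.length ∧
      (∀ i < c.toNat - 1, c.toNat ≤ (d.getD i []).length) ∧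
      c.toNat - 1 ≤ (d.getD (c.toNat - 1) []).length)
instance (d : List (List Int)) (c : Int) : Decidable (Pre_strongest_path_strengths d c) := by
  unfold Pre_strongest_path_strengths; infer_instance

def pvWitness_strongest_path_strengths : List (List Int) × Int := ([[0, 3], [1, 0]], 2)

def Spec_strongest_path_strengths (d : List (List Int)) (c : Int) (out : List (List Int)) : Prop := out = strongest_path_strengths_alt d c
instance (d : List (List Int)) (c : Int) (out : List (List Int)) : Decidable (Spec_strongest_path_strengths d c out) := by unfold Spec_strongest_path_strengths; infer_instance

-- ===== CLAIM (what is proved, stated in full; the proofs are below) =====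
def Claim_equal_strongest_path_strengths : Prop := ∀ (d : List (List Int)) (c : Int), Dom_strongest_path_strengths d c → Pre_strongest_path_strengths d c → Spec_strongest_path_strengths d c (strongest_path_strengths d c)

-- ===== LEMMAS AND PROOFS =====

-- Nat-level views of the matrix primitives
def mgN (m : List (List Int)) (a b : Nat) : Int := (m.getD a []).getD b 0
def msN (m : List (List Int)) (a b : Nat) (v : Int) : List (List Int) :=
  m.set a ((m.getD a []).set b v)
-- square shape
def SqN (n : Nat) (m : List (List Int)) : Prop :=
  m.length = n ∧ ∀ a < n, (m.getD a []).length = n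
def idxN (n : Nat) : List Int := List.map (fun k : Nat => (k : Int)) (List.range n)
-- phase-1 entry value
def eD (d : List (List Int)) (i j : Nat) : Int :=
  if pvGet2 d i j > pvGet2 d j i then pvGet2 d i j else 0

-- bottleneck of the walk j :: L ++ [k] through edge weights e
def wB (e : Nat → Nat → Int) : Nat → List Nat → Nat → Int
  | j, [], k => e j k
  | j, v :: L, k => min (e j v) (wB e v L k)

-- Floyd–Warshall invariant after processing pivot set I: off-diagonal entry (j,k) is an
-- upper bound of all simple I-paths avoiding j,k, and is attained by some I-walk
def FWinv (e : Nat → Nat → Int) (n : Nat) (I : List Nat) (g : Nat → Nat → Int) : Prop :=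
  ∀ j k, j < n → k < n → j ≠ k →
    (∀ L, L.Nodup → (∀ v ∈ L, v ∈ I) → j ∉ L → k ∉ L → wB e j L k ≤ g j k) ∧
    (∃ L, (∀ v ∈ L, v ∈ I) ∧ g j k = wB e j L k)

-- path-doubling invariant at round bound t: entry (j,k) bounds all walks with ≤ t
-- intermediates and is attained by some walk
def BFinv (e : Nat → Nat → Int) (n : Nat) (t : Nat) (g : Nat → Nat → Int) : Prop :=
  ∀ j k, j < n → k < n → j ≠ k →
    (∀ L, (∀ v ∈ L, v < n) → L.length ≤ t → wB e j L k ≤ g j k) ∧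
    (∃ L, (∀ v ∈ L, v < n) ∧ g j k = wB e j L k)

lemma pvGet2_cast (m : List (List Int)) (a b : Nat) : pvGet2 m a b = mgN m a b := by
  simp [pvGet2, mgN, PySem.List.pyGetD_natCast]

lemma pvSet2_cast (m : List (List Int)) (a b : Nat) (v : Int) :
    pvSet2 m a b v = msN m a b v := by
  simp [pvSet2, msN, PySem.List.pySetD_natCast, PySem.List.pyGetD_natCast]

lemma getD_set_list (l : List Int) (i j : Nat) (a d : Int) :
    (l.set i a).getD j d = if i = j ∧ i < l.length then a else l.getD j d := by
  simp [List.getD_eq_getElem?_getD, List.getElem?_set]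
  split_ifs <;> simp_all <;> omega

lemma getD_set_rows (m : List (List Int)) (i j : Nat) (r : List Int) :
    (m.set i r).getD j [] = if i = j ∧ i < m.length then r else m.getD j [] := by
  simp [List.getD_eq_getElem?_getD, List.getElem?_set]
  split_ifs <;> simp_all <;> omega

lemma mgN_msN {n : Nat} {m : List (List Int)} (hp : SqN n m) {a b : Nat}
    (ha : a < n) (hb : b < n) (v : Int) (x y : Nat) :
    mgN (msN m a b v) x y = if x = a ∧ y = b then v else mgN m x y := by
  unfold mgN msN
  rw [getD_set_rows]
  by_cases hax : a = x
  · subst hax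
    have hlen : (m.getD a []).length = n := hp.2 a ha
    rw [if_pos ⟨rfl, by rw [hp.1]; exact ha⟩, getD_set_list]
    by_cases hby : y = b
    · subst hby
      rw [if_pos ⟨rfl, by rw [hlen]; exact hb⟩, if_pos ⟨rfl, rfl⟩]
    · rw [if_neg (fun h => hby h.1.symm), if_neg (fun h => hby h.2)]
  · have : ¬ (a = x ∧ a < m.length) := by intro h; exact hax h.1
    rw [if_neg this]
    have : ¬ (x = a ∧ y = b) := by intro h; exact hax h.1.symm
    rw [if_neg this]

lemma SqN_msN {n : Nat} {m : List (List Int)} (hp : SqN n m) {a : Nat} (b : Nat)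
    (ha : a < n) (v : Int) : SqN n (msN m a b v) := by
  constructor
  · simp [msN, hp.1]
  · intro x hx
    rw [msN, getD_set_rows]
    by_cases hax : a = x
    · subst hax
      rw [if_pos ⟨rfl, by rw [hp.1]; exact ha⟩]
      rw [List.length_set]
      exact hp.2 a ha
    · rw [if_neg (fun h => hax h.1)]
      exact hp.2 x hx

lemma getD_idxN_map {α : Type} (n : Nat) (g : Int → α) (dflt : α) (a : Nat) (ha : a < n) :
    ((idxN n).map g).getD a dflt = g a := by
  unfold idxN
  rw [List.map_map]
  exact PySem.List.getD_map_range _ n a dflt ha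

lemma mgN_idxN_map (n : Nat) (g : Int → Int → Int) (x y : Nat) (hx : x < n) (hy : y < n) :
    mgN ((idxN n).map (fun j => (idxN n).map (g j))) x y = g x y := by
  unfold mgN
  rw [getD_idxN_map n _ _ x hx, getD_idxN_map n _ _ y hy]

lemma SqN_idxN_map (n : Nat) (g : Int → Int → Int) :
    SqN n ((idxN n).map (fun j => (idxN n).map (g j))) := by
  constructor
  · simp [idxN]
  · intro a ha
    rw [getD_idxN_map n _ _ a ha]
    simp [idxN]

lemma matrix_ext {n : Nat} {m1 m2 : List (List Int)} (h1 : SqN n m1) (h2 : SqN n m2)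
    (h : ∀ x < n, ∀ y < n, mgN m1 x y = mgN m2 x y) : m1 = m2 := by
  apply List.ext_getElem (by rw [h1.1, h2.1])
  intro x hx1 hx2
  have hxn : x < n := by rw [← h1.1]; exact hx1
  have r1 : m1.getD x [] = m1[x] := List.getD_eq_getElem m1 [] hx1
  have r2 : m2.getD x [] = m2[x] := List.getD_eq_getElem m2 [] hx2
  apply List.ext_getElem
  · rw [← r1, ← r2, h1.2 x hxn, h2.2 x hxn]
  · intro y hy1 hy2
    have hyn : y < n := by rw [← (by rw [r1] : (m1.getD x []).length = m1[x].length), h1.2 x hxn] at hy1; exact hy1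
    have := h x hxn y hyn
    unfold mgN at this
    rw [r1, r2] at this
    rwa [List.getD_eq_getElem _ 0 hy1, List.getD_eq_getElem _ 0 hy2] at this

lemma pvA1body_cast (d : List (List Int)) (i j : Nat) (p : List (List Int)) :
    pvA1body d i p j = if i = j then p else msN p i j (eD d i j) := by
  unfold pvA1body eD
  by_cases h : i = j
  · simp [h]
  · have h' : (i : Int) ≠ (j : Int) := by exact_mod_cast h
    rw [if_neg h, if_pos h']
    split_ifs with hgt
    · rw [pvSet2_cast]
    · rw [pvSet2_cast]

lemma pvA2k_cast (i j k : Nat) (p : List (List Int)) :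
    pvA2k i j p k =
      if i = k ∨ j = k then p
      else msN p j k (max (mgN p j k) (min (mgN p j i) (mgN p i k))) := by
  unfold pvA2k
  simp only [ne_eq, Int.natCast_inj]
  by_cases h : i = k ∨ j = k
  · rw [if_neg (by tauto), if_pos h]
  · rw [if_pos (by tauto), if_neg h, pvSet2_cast, pvGet2_cast, pvGet2_cast, pvGet2_cast]

lemma pvA2j_cast (n : Nat) (i j : Nat) (p : List (List Int)) :
    pvA2j (idxN n) i p j =
      if i = j then p
      else (List.range n).foldl (fun p (k : Nat) => pvA2k i j p k) p := by
  unfold pvA2j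
  by_cases h : i = j
  · simp [h]
  · have h' : (i : Int) ≠ (j : Int) := by exact_mod_cast h
    rw [if_neg h, if_pos h']
    unfold idxN
    rw [List.foldl_map]

-- phase 1, inner loop over j for a fixed i
lemma p1inner {n : Nat} (d : List (List Int)) {i : Nat} (hi : i < n)
    (js : List Nat) (hjs : ∀ j ∈ js, j < n) :
    ∀ (p : List (List Int)), SqN n p →
      SqN n (js.foldl (fun p (j : Nat) => pvA1body d i p j) p) ∧
      ∀ x y, mgN (js.foldl (fun p (j : Nat) => pvA1body d i p j) p) x y =
        if x = i ∧ y ∈ js ∧ y ≠ i then eD d i y else mgN p x y := by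
  revert hjs
  induction js with
  | nil => intro hjs p hp; refine ⟨hp, ?_⟩; intro x y; simp
  | cons j js ih =>
    intro hjs p hp
    have hj : j < n := hjs j (List.mem_cons_self ..)
    have hjs' : ∀ j ∈ js, j < n := fun a ha => hjs a (List.mem_cons_of_mem _ ha)
    rw [List.foldl_cons, pvA1body_cast]
    by_cases hij : i = j
    · rw [if_pos hij]
      obtain ⟨hsq, hch⟩ := ih hjs' p hp
      refine ⟨hsq, ?_⟩
      intro x y
      rw [hch x y]
      by_cases h1 : x = i ∧ y ∈ js ∧ y ≠ i
      · rw [if_pos h1, if_pos ⟨h1.1, List.mem_cons_of_mem _ h1.2.1, h1.2.2⟩]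
      · rw [if_neg h1, if_neg ?_]
        rintro ⟨hx, hy, hyi⟩
        rcases List.mem_cons.mp hy with rfl | hy'
        · exact hyi (hij ▸ rfl)
        · exact h1 ⟨hx, hy', hyi⟩
    · rw [if_neg hij]
      have hp' := SqN_msN hp j hi (eD d i j)
      obtain ⟨hsq, hch⟩ := ih hjs' _ hp'
      refine ⟨hsq, ?_⟩
      intro x y
      rw [hch x y]
      by_cases h1 : x = i ∧ y ∈ js ∧ y ≠ i
      · rw [if_pos h1, if_pos ⟨h1.1, List.mem_cons_of_mem _ h1.2.1, h1.2.2⟩]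
      · rw [if_neg h1, mgN_msN hp hi hj]
        by_cases h2 : x = i ∧ y = j
        · rw [if_pos h2, if_pos ⟨h2.1, by rw [h2.2]; exact List.mem_cons_self .., by rw [h2.2]; exact fun hh => hij hh.symm⟩, h2.2]
        · rw [if_neg h2, if_neg ?_]
          rintro ⟨hx, hy, hyi⟩
          rcases List.mem_cons.mp hy with rfl | hy'
          · exact h2 ⟨hx, rfl⟩
          · exact h1 ⟨hx, hy', hyi⟩

-- phase 1, outer loop over i
lemma p1outer {n : Nat} (d : List (List Int)) (is : List Nat) (his : ∀ i ∈ is, i < n) :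
    ∀ (p : List (List Int)), SqN n p →
      SqN n (is.foldl (fun p (i : Nat) => (List.range n).foldl (fun p (j : Nat) => pvA1body d i p j) p) p) ∧
      ∀ x y, mgN (is.foldl (fun p (i : Nat) => (List.range n).foldl (fun p (j : Nat) => pvA1body d i p j) p) p) x y =
        if x ∈ is ∧ y < n ∧ y ≠ x then eD d x y else mgN p x y := by
  revert his
  induction is with
  | nil => intro _ p hp; refine ⟨hp, ?_⟩; intro x y; simp
  | cons i is ih =>
    intro his p hp
    have hi : i < n := his i (List.mem_cons_self ..)
    have his' : ∀ a ∈ is, a < n := fun a ha => his a (List.mem_cons_of_mem _ ha)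
    rw [List.foldl_cons]
    obtain ⟨hsq1, hch1⟩ := p1inner d hi (List.range n) (fun a ha => List.mem_range.mp ha) p hp
    obtain ⟨hsq, hch⟩ := ih his' _ hsq1
    refine ⟨hsq, ?_⟩
    intro x y
    rw [hch x y]
    by_cases h1 : x ∈ is ∧ y < n ∧ y ≠ x
    · rw [if_pos h1, if_pos ⟨List.mem_cons_of_mem _ h1.1, h1.2⟩]
    · rw [if_neg h1, hch1 x y]
      by_cases h2 : x = i ∧ y ∈ List.range n ∧ y ≠ i
      · rw [if_pos h2, if_pos ⟨by rw [h2.1]; exact List.mem_cons_self .., List.mem_range.mp h2.2.1,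
          by rw [h2.1]; exact h2.2.2⟩, h2.1]
      · rw [if_neg h2, if_neg ?_]
        rintro ⟨hx, hy, hyx⟩
        rcases List.mem_cons.mp hx with rfl | hx'
        · exact h2 ⟨rfl, List.mem_range.mpr hy, hyx⟩
        · exact h1 ⟨hx', hy, hyx⟩

-- phase 2, innermost loop over k for fixed pivot i and row j
lemma p2k {n : Nat} {i j : Nat} (hi : i < n) (hj : j < n) (hij : i ≠ j)
    (ks : List Nat) (hks : ∀ k ∈ ks, k < n) (hnd : ks.Nodup) :
    ∀ (p : List (List Int)), SqN n p →
      SqN n (ks.foldl (fun p (k : Nat) => pvA2k i j p k) p) ∧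
      ∀ x y, mgN (ks.foldl (fun p (k : Nat) => pvA2k i j p k) p) x y =
        if x = j ∧ y ∈ ks ∧ y ≠ i ∧ y ≠ j
        then max (mgN p j y) (min (mgN p j i) (mgN p i y)) else mgN p x y := by
  revert hks hnd
  induction ks with
  | nil => intro _ _ p hp; refine ⟨hp, ?_⟩; intro x y; simp
  | cons k ks ih =>
    intro hks hnd p hp
    have hk : k < n := hks k (List.mem_cons_self ..)
    have hks' : ∀ a ∈ ks, a < n := fun a ha => hks a (List.mem_cons_of_mem _ ha)
    have hknotin : k ∉ ks := (List.nodup_cons.mp hnd).1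
    have hnd' : ks.Nodup := (List.nodup_cons.mp hnd).2
    rw [List.foldl_cons, pvA2k_cast]
    by_cases hc : i = k ∨ j = k
    · rw [if_pos hc]
      obtain ⟨hsq, hch⟩ := ih hks' hnd' p hp
      refine ⟨hsq, ?_⟩
      intro x y
      rw [hch x y]
      by_cases h1 : x = j ∧ y ∈ ks ∧ y ≠ i ∧ y ≠ j
      · rw [if_pos h1, if_pos ⟨h1.1, List.mem_cons_of_mem _ h1.2.1, h1.2.2⟩]
      · rw [if_neg h1, if_neg ?_]
        rintro ⟨hx, hy, hyi, hyj⟩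
        rcases List.mem_cons.mp hy with rfl | hy'
        · rcases hc with rfl | rfl
          · exact hyi rfl
          · exact hyj rfl
        · exact h1 ⟨hx, hy', hyi, hyj⟩
    · have hik : i ≠ k := fun h => hc (Or.inl h)
      have hjk : j ≠ k := fun h => hc (Or.inr h)
      rw [if_neg hc]
      have hp' := SqN_msN hp k hj (max (mgN p j k) (min (mgN p j i) (mgN p i k)))
      obtain ⟨hsq, hch⟩ := ih hks' hnd' _ hp'
      refine ⟨hsq, ?_⟩
      intro x y
      rw [hch x y]
      have hm := mgN_msN hp hj hk (max (mgN p j k) (min (mgN p j i) (mgN p i k)))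
      by_cases h1 : x = j ∧ y ∈ ks ∧ y ≠ i ∧ y ≠ j
      · rw [if_pos h1, if_pos ⟨h1.1, List.mem_cons_of_mem _ h1.2.1, h1.2.2⟩]
        rw [hm j y, hm j i, hm i y]
        rw [if_neg (fun h : j = j ∧ y = k => hknotin (h.2 ▸ h1.2.1)),
          if_neg (fun h : j = j ∧ i = k => hik h.2),
          if_neg (fun h : i = j ∧ y = k => hij h.1)]
      · rw [if_neg h1, hm x y]
        by_cases h2 : x = j ∧ y = k
        · rw [if_pos h2, if_pos ⟨h2.1, by rw [h2.2]; exact List.mem_cons_self ..,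
            by rw [h2.2]; exact fun hh => hik hh.symm, by rw [h2.2]; exact fun hh => hjk hh.symm⟩,
            h2.2]
        · rw [if_neg h2, if_neg ?_]
          rintro ⟨hx, hy, hyi, hyj⟩
          rcases List.mem_cons.mp hy with rfl | hy'
          · exact h2 ⟨hx, rfl⟩
          · exact h1 ⟨hx, hy', hyi, hyj⟩

-- phase 2, loop over rows j for a fixed pivot i
lemma p2j {n : Nat} {i : Nat} (hi : i < n)
    (js : List Nat) (hjs : ∀ j ∈ js, j < n) (hnd : js.Nodup) :
    ∀ (p : List (List Int)), SqN n p →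
      SqN n (js.foldl (fun p (j : Nat) => pvA2j (idxN n) i p j) p) ∧
      ∀ x y, mgN (js.foldl (fun p (j : Nat) => pvA2j (idxN n) i p j) p) x y =
        if x ∈ js ∧ x ≠ i ∧ y ≠ i ∧ y ≠ x ∧ y < n
        then max (mgN p x y) (min (mgN p x i) (mgN p i y)) else mgN p x y := by
  revert hjs hnd
  induction js with
  | nil => intro _ _ p hp; refine ⟨hp, ?_⟩; intro x y; simp
  | cons j js ih =>
    intro hjs hnd p hp
    have hj : j < n := hjs j (List.mem_cons_self ..)
    have hjs' : ∀ a ∈ js, a < n := fun a ha => hjs a (List.mem_cons_of_mem _ ha)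
    have hjnotin : j ∉ js := (List.nodup_cons.mp hnd).1
    have hnd' : js.Nodup := (List.nodup_cons.mp hnd).2
    rw [List.foldl_cons, pvA2j_cast n]
    by_cases hij : i = j
    · rw [if_pos hij]
      obtain ⟨hsq, hch⟩ := ih hjs' hnd' p hp
      refine ⟨hsq, ?_⟩
      intro x y
      rw [hch x y]
      by_cases h1 : x ∈ js ∧ x ≠ i ∧ y ≠ i ∧ y ≠ x ∧ y < n
      · rw [if_pos h1, if_pos ⟨List.mem_cons_of_mem _ h1.1, h1.2⟩]
      · rw [if_neg h1, if_neg ?_]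
        rintro ⟨hx, hxi, rest⟩
        rcases List.mem_cons.mp hx with rfl | hx'
        · exact hxi hij.symm
        · exact h1 ⟨hx', hxi, rest⟩
    · rw [if_neg hij]
      obtain ⟨hsq1, hch1⟩ :=
        p2k hi hj hij (List.range n) (fun a ha => List.mem_range.mp ha) List.nodup_range p hp
      obtain ⟨hsq, hch⟩ := ih hjs' hnd' _ hsq1
      refine ⟨hsq, ?_⟩
      intro x y
      rw [hch x y]
      by_cases h1 : x ∈ js ∧ x ≠ i ∧ y ≠ i ∧ y ≠ x ∧ y < n
      · rw [if_pos h1, if_pos ⟨List.mem_cons_of_mem _ h1.1, h1.2⟩]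
        have hxj : x ≠ j := fun h => hjnotin (h ▸ h1.1)
        rw [hch1 x y, hch1 x i, hch1 i y]
        rw [if_neg (fun h : x = j ∧ y ∈ List.range n ∧ y ≠ i ∧ y ≠ j => hxj h.1),
          if_neg (fun h : x = j ∧ i ∈ List.range n ∧ i ≠ i ∧ i ≠ j => hxj h.1),
          if_neg (fun h : i = j ∧ y ∈ List.range n ∧ y ≠ i ∧ y ≠ j => hij h.1)]
      · rw [if_neg h1, hch1 x y]
        by_cases h2 : x = j ∧ y ∈ List.range n ∧ y ≠ i ∧ y ≠ j
        · rw [if_pos h2, if_pos ⟨by rw [h2.1]; exact List.mem_cons_self ..,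
            by rw [h2.1]; exact fun hh => hij hh.symm, h2.2.2.1,
            by rw [h2.1]; exact h2.2.2.2, List.mem_range.mp h2.2.1⟩, h2.1]
        · rw [if_neg h2, if_neg ?_]
          rintro ⟨hx, hxi, hyi, hyx, hyn⟩
          rcases List.mem_cons.mp hx with rfl | hx'
          · exact h2 ⟨rfl, List.mem_range.mpr hyn, hyi, hyx⟩
          · exact h1 ⟨hx', hxi, hyi, hyx, hyn⟩

lemma foldl_idxN {β : Type} (n : Nat) (f : β → Int → β) (b : β) :
    (idxN n).foldl f b = (List.range n).foldl (fun x (k : Nat) => f x k) b := by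
  unfold idxN
  rw [List.foldl_map]

-- ===== walk machinery =====

lemma wB_append (e : Nat → Nat → Int) (j v k : Nat) (L1 L2 : List Nat) :
    wB e j (L1 ++ v :: L2) k = min (wB e j L1 v) (wB e v L2 k) := by
  induction L1 generalizing j with
  | nil => simp [wB]
  | cons a L1 ih => simp [wB, ih, min_assoc]

lemma foldl_max_init (l : List Int) (a : Int) : a ≤ l.foldl max a := by
  induction l generalizing a with
  | nil => simp
  | cons b l ih => exact le_trans (le_max_left a b) (ih _)

lemma foldl_max_mem (l : List Int) (a b : Int) (h : b ∈ l) : b ≤ l.foldl max a := by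
  induction l generalizing a with
  | nil => simp at h
  | cons x l ih =>
    rcases List.mem_cons.mp h with rfl | h'
    · exact le_trans (le_max_right a b) (foldl_max_init _ _)
    · exact ih _ h'

lemma foldl_max_choice (l : List Int) (a : Int) : l.foldl max a = a ∨ l.foldl max a ∈ l := by
  induction l generalizing a with
  | nil => left; rfl
  | cons x l ih =>
    rcases ih (max a x) with h | h
    · rcases max_choice a x with h2 | h2
      · left; rw [List.foldl_cons, h, h2]
      · right; rw [List.foldl_cons, h, h2]; exact List.mem_cons_self ..
    · right; exact List.mem_cons_of_mem _ h

lemma not_nodup_split {L : List Nat} (h : ¬ L.Nodup) :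
    ∃ a s u r, L = s ++ a :: u ++ a :: r := by
  induction L with
  | nil => simp at h
  | cons v L ih =>
    by_cases hv : v ∈ L
    · obtain ⟨s, t, rfl⟩ := List.append_of_mem hv
      exact ⟨v, [], s, t, rfl⟩
    · have : ¬ L.Nodup := fun hn => h (List.nodup_cons.mpr ⟨hv, hn⟩)
      obtain ⟨a, s, u, r, rfl⟩ := ih this
      exact ⟨a, v :: s, u, r, rfl⟩

-- every walk is dominated by a simple path avoiding both endpoints
lemma cleanup_aux (e : Nat → Nat → Int) (n j k : Nat) :
    ∀ (N : Nat) (L : List Nat), L.length ≤ N → (∀ v ∈ L, v < n) →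
      ∃ L', L'.Nodup ∧ (∀ v ∈ L', v < n) ∧ j ∉ L' ∧ k ∉ L' ∧ L'.length ≤ n ∧
        wB e j L k ≤ wB e j L' k := by
  intro N
  induction N with
  | zero =>
    intro L hlen _
    have : L = [] := List.eq_nil_of_length_eq_zero (Nat.le_zero.mp hlen)
    subst this
    exact ⟨[], List.nodup_nil, by simp, by simp, by simp, by simp, le_rfl⟩
  | succ N ih =>
    intro L hlen hL
    by_cases hj : j ∈ L
    · obtain ⟨s, r, rfl⟩ := List.append_of_mem hj
      have hr : ∀ v ∈ r, v < n := fun v hv => hL v (by simp [hv])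
      have hrlen : r.length ≤ N := by have := hlen; simp at this; omega
      obtain ⟨L', h1, h2, h3, h4, h5, h6⟩ := ih r hrlen hr
      refine ⟨L', h1, h2, h3, h4, h5, ?_⟩
      calc wB e j (s ++ j :: r) k = min (wB e j s j) (wB e j r k) := wB_append e j j k s r
        _ ≤ wB e j r k := min_le_right _ _
        _ ≤ wB e j L' k := h6
    · by_cases hk : k ∈ L
      · obtain ⟨s, r, rfl⟩ := List.append_of_mem hk
        have hs : ∀ v ∈ s, v < n := fun v hv => hL v (by simp [hv])
        have hslen : s.length ≤ N := by have := hlen; simp at this; omega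
        obtain ⟨L', h1, h2, h3, h4, h5, h6⟩ := ih s hslen hs
        refine ⟨L', h1, h2, h3, h4, h5, ?_⟩
        calc wB e j (s ++ k :: r) k = min (wB e j s k) (wB e k r k) := wB_append e j k k s r
          _ ≤ wB e j s k := min_le_left _ _
          _ ≤ wB e j L' k := h6
      · by_cases hnd : L.Nodup
        · refine ⟨L, hnd, hL, hj, hk, ?_, le_rfl⟩
          have hsub : L ⊆ List.range n := fun v hv => List.mem_range.mpr (hL v hv)
          simpa using (hnd.subperm hsub).length_le
        · obtain ⟨a, s, u, r, rfl⟩ := not_nodup_split hnd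
          have hsr : ∀ v ∈ s ++ a :: r, v < n := by
            intro v hv
            rcases List.mem_append.mp hv with h | h
            · exact hL v (by simp [h])
            · rcases List.mem_cons.mp h with rfl | h
              · exact hL v (by simp)
              · exact hL v (by simp [h])
          have hsrlen : (s ++ a :: r).length ≤ N := by
            have := hlen; simp at this ⊢; omega
          obtain ⟨L', h1, h2, h3, h4, h5, h6⟩ := ih (s ++ a :: r) hsrlen hsr
          refine ⟨L', h1, h2, h3, h4, h5, ?_⟩
          calc wB e j (s ++ a :: u ++ a :: r) k
              = min (wB e j s a) (wB e a (u ++ a :: r) k) := by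
                have := wB_append e j a k s (u ++ a :: r); simpa using this
            _ = min (wB e j s a) (min (wB e a u a) (wB e a r k)) := by
                rw [wB_append e a a k u r]
            _ ≤ min (wB e j s a) (wB e a r k) :=
                min_le_min le_rfl (min_le_right _ _)
            _ = wB e j (s ++ a :: r) k := (wB_append e j a k s r).symm
            _ ≤ wB e j L' k := h6

lemma cleanup (e : Nat → Nat → Int) (n j k : Nat) (L : List Nat) (h : ∀ v ∈ L, v < n) :
    ∃ L', L'.Nodup ∧ (∀ v ∈ L', v < n) ∧ j ∉ L' ∧ k ∉ L' ∧ L'.length ≤ n ∧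
      wB e j L k ≤ wB e j L' k :=
  cleanup_aux e n j k L.length L le_rfl h

-- ===== Floyd–Warshall side =====

-- one pivot step preserves the FW invariant
lemma fw_step (e : Nat → Nat → Int) (n : Nat) (I : List Nat) (g g' : Nat → Nat → Int)
    (i : Nat) (hi : i < n) (hiI : i ∉ I) (hinv : FWinv e n I g)
    (hg' : ∀ x y, x < n → y < n → x ≠ y →
      g' x y = if x ≠ i ∧ y ≠ i ∧ y ≠ x then max (g x y) (min (g x i) (g i y)) else g x y) :
    FWinv e n (I ++ [i]) g' := by
  intro j k hj hk hjk
  have hgle : ∀ x y, x < n → y < n → x ≠ y → g x y ≤ g' x y := by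
    intro x y hx hy hxy
    rw [hg' x y hx hy hxy]
    split_ifs with h
    · exact le_max_left _ _
    · exact le_rfl
  constructor
  · -- upper bound
    intro L hnd hmem hjL hkL
    by_cases hiL : i ∈ L
    · -- split the candidate at its unique occurrence of i
      obtain ⟨s, r, rfl⟩ := List.append_of_mem hiL
      have hji : j ≠ i := fun h => hjL (h ▸ hiL)
      have hki : k ≠ i := fun h => hkL (h ▸ hiL)
      have hnds : s.Nodup := (List.nodup_append.mp hnd).1
      have hndr : r.Nodup := (List.nodup_cons.mp (List.nodup_append.mp hnd).2.1).2
      have hdisj := (List.nodup_append.mp hnd).2.2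
      have his : i ∉ s := fun h => hdisj i h i (List.mem_cons_self ..) rfl
      have hir : i ∉ r := (List.nodup_cons.mp (List.nodup_append.mp hnd).2.1).1
      have hmems : ∀ v ∈ s, v ∈ I := by
        intro v hv
        rcases List.mem_append.mp (hmem v (by simp [hv])) with h | h
        · exact h
        · simp at h; exact absurd (h ▸ hv) his
      have hmemr : ∀ v ∈ r, v ∈ I := by
        intro v hv
        rcases List.mem_append.mp (hmem v (by simp [hv])) with h | h
        · exact h
        · simp at h; exact absurd (h ▸ hv) hir
      have hjs : j ∉ s := fun h => hjL (by simp [h])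
      have hir' : i ∉ s := his
      have hkr : k ∉ r := fun h => hkL (by simp [h])
      have h1 : wB e j s i ≤ g j i :=
        (hinv j i hj hi hji).1 s hnds hmems hjs his
      have h2 : wB e i r k ≤ g i k :=
        (hinv i k hi hk (fun h => hki h.symm)).1 r hndr hmemr hir hkr
      rw [wB_append]
      calc min (wB e j s i) (wB e i r k) ≤ min (g j i) (g i k) := min_le_min h1 h2
        _ ≤ g' j k := by
            rw [hg' j k hj hk hjk, if_pos ⟨hji, hki, fun h => hjk h.symm⟩]
            exact le_max_right _ _
    · have hmem' : ∀ v ∈ L, v ∈ I := by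
        intro v hv
        rcases List.mem_append.mp (hmem v hv) with h | h
        · exact h
        · simp at h; exact absurd (h ▸ hv) hiL
      exact le_trans ((hinv j k hj hk hjk).1 L hnd hmem' hjL hkL)
        (hgle j k hj hk hjk)
  · -- attainment
    rw [hg' j k hj hk hjk]
    split_ifs with h
    · obtain ⟨hji, hki, _⟩ := h
      rcases max_choice (g j k) (min (g j i) (g i k)) with hmx | hmx
      · obtain ⟨L, hL1, hL2⟩ := (hinv j k hj hk hjk).2
        exact ⟨L, fun v hv => List.mem_append_left _ (hL1 v hv), by rw [hmx, hL2]⟩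
      · obtain ⟨L1, hA1, hA2⟩ := (hinv j i hj hi hji).2
        obtain ⟨L2, hB1, hB2⟩ := (hinv i k hi hk (fun hh => hki hh.symm)).2
        refine ⟨L1 ++ i :: L2, ?_, ?_⟩
        · intro v hv
          rcases List.mem_append.mp hv with hv | hv
          · exact List.mem_append_left _ (hA1 v hv)
          · rcases List.mem_cons.mp hv with rfl | hv
            · exact List.mem_append_right _ (by simp)
            · exact List.mem_append_left _ (hB1 v hv)
        · rw [hmx, wB_append, hA2, hB2]
    · obtain ⟨L, hL1, hL2⟩ := (hinv j k hj hk hjk).2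
      exact ⟨L, fun v hv => List.mem_append_left _ (hL1 v hv), hL2⟩

-- folding phase 2 over a pivot list
lemma fw_fold (e : Nat → Nat → Int) (n : Nat) :
    ∀ (todo done : List Nat), (done ++ todo).Nodup → (∀ v ∈ todo, v < n) →
      ∀ (p : List (List Int)), SqN n p → FWinv e n done (fun x y => mgN p x y) →
      SqN n (todo.foldl (fun p (i : Nat) => (List.range n).foldl (fun p (j : Nat) => pvA2j (idxN n) i p j) p) p) ∧
      FWinv e n (done ++ todo) (fun x y => mgN (todo.foldl (fun p (i : Nat) => (List.range n).foldl (fun p (j : Nat) => pvA2j (idxN n) i p j) p) p) x y) ∧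
      (∀ x, x < n → mgN (todo.foldl (fun p (i : Nat) => (List.range n).foldl (fun p (j : Nat) => pvA2j (idxN n) i p j) p) p) x x = mgN p x x) := by
  intro todo
  induction todo with
  | nil =>
    intro done _ _ p hp hinv
    refine ⟨hp, ?_, fun x _ => rfl⟩
    simpa using hinv
  | cons i todo ih =>
    intro done hnd htodo p hp hinv
    have hi : i < n := htodo i (List.mem_cons_self ..)
    have hiI : i ∉ done := by
      have hdisj := (List.nodup_append.mp hnd).2.2
      exact fun h => hdisj i h i (List.mem_cons_self ..) rfl
    obtain ⟨hsq1, hch1⟩ :=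
      p2j hi (List.range n) (fun a ha => List.mem_range.mp ha) List.nodup_range p hp
    have hstep : FWinv e n (done ++ [i])
        (fun x y => mgN ((List.range n).foldl (fun p (j : Nat) => pvA2j (idxN n) i p j) p) x y) := by
      apply fw_step e n done _ _ i hi hiI hinv
      intro x y hx hy hxy
      rw [hch1 x y]
      by_cases h : x ≠ i ∧ y ≠ i ∧ y ≠ x
      · rw [if_pos h, if_pos ⟨List.mem_range.mpr hx, h.1, h.2.1, h.2.2, hy⟩]
      · rw [if_neg h, if_neg ?_]
        rintro ⟨-, h1, h2, h3, -⟩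
        exact h ⟨h1, h2, h3⟩
    have hnd' : ((done ++ [i]) ++ todo).Nodup := by
      rw [List.append_assoc]
      simpa using hnd
    have htodo' : ∀ v ∈ todo, v < n := fun v hv => htodo v (List.mem_cons_of_mem _ hv)
    obtain ⟨hsq, hinv', hdiag⟩ := ih (done ++ [i]) hnd' htodo' _ hsq1 hstep
    rw [List.foldl_cons]
    refine ⟨hsq, ?_, ?_⟩
    · rw [show done ++ i :: todo = (done ++ [i]) ++ todo by rw [List.append_assoc]; rfl]
      exact hinv'
    · intro x hx
      rw [hdiag x hx, hch1 x x, if_neg (by rintro ⟨-, -, -, h, -⟩; exact h rfl)]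

-- ===== path-doubling side =====

-- entrywise characterization of one squaring round
lemma pvSq_char (n : Nat) (m : List (List Int)) (x y : Nat) (hx : x < n) (hy : y < n) :
    mgN (pvSq (idxN n) m) x y =
      if x = y then mgN m x y
      else (((List.range n).filter (fun i => i ≠ x ∧ i ≠ y)).map
              (fun i => min (mgN m x i) (mgN m i y))).foldl max (mgN m x y) := by
  unfold pvSq
  rw [mgN_idxN_map n (fun j k =>
    if j = k then pvGet2 m j k
    else ((idxN n).filter (fun i => i ≠ j ∧ i ≠ k)).map
          (fun i => min (pvGet2 m j i) (pvGet2 m i k)) |>.foldl max (pvGet2 m j k)) x y hx hy]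
  by_cases hxy : x = y
  · simp [hxy, pvGet2_cast]
  · have hxy' : (x : Int) ≠ (y : Int) := by exact_mod_cast hxy
    rw [if_neg hxy', if_neg hxy, pvGet2_cast]
    congr 1
    unfold idxN
    induction (List.range n) with
    | nil => rfl
    | cons a l ihl =>
      rw [List.map_cons, List.filter_cons, List.filter_cons]
      by_cases ha : a = x ∨ a = y
      · have : ¬ ((a : Int) ≠ (x : Int) ∧ (a : Int) ≠ (y : Int)) := by
          rcases ha with rfl | rfl
          · intro h; exact h.1 rfl
          · intro h; exact h.2 rfl
        have : decide ((a : Int) ≠ (x : Int) ∧ (a : Int) ≠ (y : Int)) = false := by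
          simpa using this
        rw [this]
        have : decide (a ≠ x ∧ a ≠ y) = false := by
          simp only [decide_eq_false_iff_not]
          rcases ha with rfl | rfl
          · intro h; exact h.1 rfl
          · intro h; exact h.2 rfl
        rw [this]
        exact ihl
      · push_neg at ha
        have h1 : decide ((a : Int) ≠ (x : Int) ∧ (a : Int) ≠ (y : Int)) = true := by
          simp only [decide_eq_true_eq]
          exact ⟨by exact_mod_cast ha.1, by exact_mod_cast ha.2⟩
        have h2 : decide (a ≠ x ∧ a ≠ y) = true := by
          simpa using ha
        rw [h1, h2]
        simp only [if_true, List.map_cons]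
        rw [ihl, pvGet2_cast, pvGet2_cast]

lemma SqN_pvSq (n : Nat) (m : List (List Int)) : SqN n (pvSq (idxN n) m) :=
  SqN_idxN_map n (fun j k =>
    if j = k then pvGet2 m j k
    else ((idxN n).filter (fun i => i ≠ j ∧ i ≠ k)).map
          (fun i => min (pvGet2 m j i) (pvGet2 m i k)) |>.foldl max (pvGet2 m j k))

-- one squaring round doubles the walk bound
lemma bf_square (e : Nat → Nat → Int) (n : Nat) (t : Nat) (m : List (List Int))
    (hinv : BFinv e n t (fun x y => mgN m x y)) :
    BFinv e n (2 * t + 1) (fun x y => mgN (pvSq (idxN n) m) x y) := by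
  intro j k hj hk hjk
  have hch := pvSq_char n m j k hj hk
  rw [if_neg hjk] at hch
  constructor
  · intro L hL hlen
    simp only [hch]
    by_cases hsmall : L.length ≤ t
    · exact le_trans ((hinv j k hj hk hjk).1 L hL hsmall) (foldl_max_init _ _)
    · have htlt : t < L.length := not_le.mp hsmall
      have hsplit : L = L.take t ++ L[t] :: L.drop (t + 1) := by
        conv_lhs => rw [← List.take_append_drop t L, List.drop_eq_getElem_cons htlt]
      have hLt : ∀ w ∈ L.take t, w < n := fun w hw => hL w (List.mem_of_mem_take hw)
      have hLd : ∀ w ∈ L.drop (t + 1), w < n := fun w hw => hL w (List.mem_of_mem_drop hw)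
      have hlt : (L.take t).length ≤ t := by rw [List.length_take]; omega
      have hld : (L.drop (t + 1)).length ≤ t := by rw [List.length_drop]; omega
      have hv : L[t] < n := hL _ (List.getElem_mem htlt)
      have hwb := wB_append e j L[t] k (L.take t) (L.drop (t + 1))
      rw [← hsplit] at hwb
      rw [hwb]
      by_cases hvj : L[t] = j
      · refine le_trans (min_le_right _ _) (le_trans ?_ (foldl_max_init _ _))
        rw [hvj]
        exact (hinv j k hj hk hjk).1 _ hLd hld
      · by_cases hvk : L[t] = k
        · refine le_trans (min_le_left _ _) (le_trans ?_ (foldl_max_init _ _))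
          rw [hvk]
          exact (hinv j k hj hk hjk).1 _ hLt hlt
        · have h1 : wB e j (L.take t) L[t] ≤ mgN m j L[t] :=
            (hinv j L[t] hj hv (fun h => hvj h.symm)).1 _ hLt hlt
          have h2 : wB e L[t] (L.drop (t + 1)) k ≤ mgN m L[t] k :=
            (hinv L[t] k hv hk hvk).1 _ hLd hld
          refine le_trans (min_le_min h1 h2) (foldl_max_mem _ _ _ ?_)
          refine List.mem_map.mpr ⟨L[t], List.mem_filter.mpr ⟨List.mem_range.mpr hv, ?_⟩, rfl⟩
          simp [hvj, hvk]
  · simp only [hch]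
    rcases foldl_max_choice (((List.range n).filter (fun i => i ≠ j ∧ i ≠ k)).map
        (fun i => min (mgN m j i) (mgN m i k))) (mgN m j k) with h | h
    · rw [h]; exact (hinv j k hj hk hjk).2
    · obtain ⟨v, hvmem, hval⟩ := List.mem_map.mp h
      obtain ⟨hvr, hvd⟩ := List.mem_filter.mp hvmem
      have hv : v < n := List.mem_range.mp hvr
      have hvjk : v ≠ j ∧ v ≠ k := by simpa using hvd
      obtain ⟨L1, hA1, hA2⟩ := (hinv j v hj hv (fun h => hvjk.1 h.symm)).2
      obtain ⟨L2, hB1, hB2⟩ := (hinv v k hv hk hvjk.2).2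
      refine ⟨L1 ++ v :: L2, ?_, ?_⟩
      · intro w hw
        rcases List.mem_append.mp hw with hw | hw
        · exact hA1 w hw
        · rcases List.mem_cons.mp hw with rfl | hw
          · exact hv
          · exact hB1 w hw
      · have hA2' : mgN m j v = wB e j L1 v := hA2
        have hB2' : mgN m v k = wB e v L2 k := hB2
        rw [← hval, wB_append, hA2', hB2']

-- the whole while-loop
lemma loop_char (e : Nat → Nat → Int) (n : Nat) (c : Int) :
    ∀ (t : Nat) (m : List (List Int)), SqN n m → BFinv e n t (fun x y => mgN m x y) →
      SqN n (pvLoop (idxN n) c t m) ∧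
      (∃ t' : Nat, c ≤ (t' : Int) ∧ t ≤ t' ∧ BFinv e n t' (fun x y => mgN (pvLoop (idxN n) c t m) x y)) ∧
      (∀ x, x < n → mgN (pvLoop (idxN n) c t m) x x = mgN m x x) := by
  intro t m
  induction t, m using pvLoop.induct (idx := idxN n) (c := c) with
  | case1 t m hlt ih =>
    intro hsq hinv
    rw [pvLoop, dif_pos hlt]
    obtain ⟨h1, ⟨t', ht1, ht2, ht3⟩, h3⟩ := ih (SqN_pvSq n m) (bf_square e n t m hinv)
    refine ⟨h1, ⟨t', ht1, by omega, ht3⟩, ?_⟩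
    intro x hx
    rw [h3 x hx, pvSq_char n m x x hx hx, if_pos rfl]
  | case2 t m hlt =>
    intro hsq hinv
    rw [pvLoop, dif_neg hlt]
    exact ⟨hsq, ⟨t, not_lt.mp hlt, le_rfl, hinv⟩, fun x _ => rfl⟩

-- ===== bridge =====
lemma fw_eq_bf (e : Nat → Nat → Int) (n t : Nat) (F G : Nat → Nat → Int)
    (hF : FWinv e n (List.range n) F) (hG : BFinv e n t G) (hnt : n ≤ t) :
    ∀ j k, j < n → k < n → j ≠ k → F j k = G j k := by
  intro j k hj hk hjk
  obtain ⟨hFub, LF, hLF1, hLF2⟩ := hF j k hj hk hjk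
  obtain ⟨hGub, LG, hLG1, hLG2⟩ := hG j k hj hk hjk
  apply le_antisymm
  · obtain ⟨L', _, h2, _, _, h5, h6⟩ :=
      cleanup e n j k LF (fun v hv => List.mem_range.mp (hLF1 v hv))
    rw [hLF2]
    exact le_trans h6 (hGub L' h2 (le_trans h5 hnt))
  · obtain ⟨L', h1, h2, h3, h4, _, h6⟩ := cleanup e n j k LG hLG1
    rw [hLG2]
    exact le_trans h6 (hFub L' h1 (fun v hv => List.mem_range.mpr (h2 v hv)) h3 h4)

lemma eD_eq_pvE (d : List (List Int)) (j k : Nat) (h : j ≠ k) :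
    eD d j k = pvE d j k := by
  unfold eD pvE
  have h' : (j : Int) ≠ (k : Int) := by exact_mod_cast h
  by_cases hgt : pvGet2 d j k > pvGet2 d k j
  · rw [if_pos hgt, if_pos ⟨h', hgt⟩]
  · rw [if_neg hgt, if_neg (fun hh => hgt hh.2)]

-- ===== VERDICT (by name: the statement is the Claim_ definition above) =====
theorem strongest_path_strengths_spec : Claim_equal_strongest_path_strengths := by
  unfold Claim_equal_strongest_path_strengths Spec_strongest_path_strengths
  intro d c _ _
  unfold strongest_path_strengths strongest_path_strengths_alt
  have hidx : PySem.List.pyRange 0 c 1 = idxN c.toNat := by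
    rw [PySem.List.pyRange_one]; simp [idxN]
  rw [hidx]
  simp only [foldl_idxN]
  have hp0 : SqN c.toNat ((idxN c.toNat).map (fun _ => (idxN c.toNat).map (fun _ => (0 : Int)))) :=
    SqN_idxN_map c.toNat (fun _ _ => 0)
  obtain ⟨hsq1, hch1⟩ :=
    p1outer d (List.range c.toNat) (fun a ha => List.mem_range.mp ha) _ hp0
  have hbase : FWinv (fun x y => pvE d x y) c.toNat []
      (fun x y => mgN ((List.range c.toNat).foldl
        (fun p (i : Nat) => (List.range c.toNat).foldl (fun p (j : Nat) => pvA1body d i p j) p)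
        ((idxN c.toNat).map (fun _ => (idxN c.toNat).map (fun _ => (0 : Int))))) x y) := by
    intro j k hj hk hjk
    have hval : mgN ((List.range c.toNat).foldl
        (fun p (i : Nat) => (List.range c.toNat).foldl (fun p (j : Nat) => pvA1body d i p j) p)
        ((idxN c.toNat).map (fun _ => (idxN c.toNat).map (fun _ => (0 : Int))))) j k = pvE d j k := by
      rw [hch1 j k, if_pos ⟨List.mem_range.mpr hj, hk, fun h => hjk h.symm⟩]
      exact eD_eq_pvE d j k hjk
    constructor
    · intro L _ hmem _ _
      have hLnil : L = [] := by
        cases L with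
        | nil => rfl
        | cons a L => exact absurd (hmem a (List.mem_cons_self ..)) (by simp)
      subst hLnil
      exact le_of_eq hval.symm
    · exact ⟨[], by simp, hval⟩
  obtain ⟨hsqF, hinvF, hdiagF⟩ :=
    fw_fold (fun x y => pvE d x y) c.toNat (List.range c.toNat) []
      (by simpa using List.nodup_range) (fun a ha => List.mem_range.mp ha) _ hsq1 hbase
  have hm0 : SqN c.toNat ((idxN c.toNat).map (fun j => (idxN c.toNat).map (fun k => pvE d j k))) :=
    SqN_idxN_map c.toNat (fun j k => pvE d j k)
  have hbf0 : BFinv (fun x y => pvE d x y) c.toNat 0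
      (fun x y => mgN ((idxN c.toNat).map (fun j => (idxN c.toNat).map (fun k => pvE d j k))) x y) := by
    intro j k hj hk hjk
    have hval := mgN_idxN_map c.toNat (fun j k => pvE d j k) j k hj hk
    constructor
    · intro L _ hlen
      have hLnil : L = [] := List.eq_nil_of_length_eq_zero (Nat.le_zero.mp hlen)
      subst hLnil
      exact le_of_eq hval.symm
    · exact ⟨[], by simp, hval⟩
  obtain ⟨hsqG, ⟨t', hct', htt', hinvG⟩, hdiagG⟩ :=
    loop_char (fun x y => pvE d x y) c.toNat c 0 _ hm0 hbf0
  have hnt : c.toNat ≤ t' := by omega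
  apply matrix_ext hsqF hsqG
  intro x hx y hy
  by_cases hxy : x = y
  · subst hxy
    rw [hdiagF x hx, hdiagG x hx, hch1 x x,
      if_neg (by rintro ⟨-, -, h⟩; exact h rfl),
      mgN_idxN_map c.toNat (fun _ _ => (0 : Int)) x x hx hx,
      mgN_idxN_map c.toNat (fun j k => pvE d j k) x x hx hx]
    unfold pvE
    rw [if_neg (fun h => h.1 rfl)]
  · exact fw_eq_bf (fun x y => pvE d x y) c.toNat t' _ _ (by simpa using hinvF) hinvG hnt
      x y hx hy hxy
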